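-- pv_equiv track=rewrite | github.com/anand700/OnlineSocialNetworkingAndAnalysis | cluster.py | calculateOverlapOfFriends
-- ===== SOURCE A (Python) =====
-- from collections import Counter, defaultdict, deque
--
-- def count_friends(users):
--     c = Counter()
--     for usrs in users:
--     	c.update(usrs['friends'])
--     return c
--
-- def calculateOverlapOfFriends(user1, user2):
--     users = []
--     c = Counter()
--     N = 0
--     users.append(user1)
--     users.append(user2)
--
--     c = count_friends(users)
--
--     for value in c.values():
--     	if value == 2:
--     		N += 1
--     c.clear()
--     users.clear()
--     return N
-- ===== SOURCE B (Python) =====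
-- def calculateOverlapOfFriends(user1, user2):
--     merged = sorted(user1['friends'] + user2['friends'])
--     if not merged:
--         return 0
--     n = 0
--     cur = merged[0]
--     runlen = 1
--     for y in merged[1:]:
--         if y == cur:
--             runlen += 1
--         else:
--             if runlen == 2:
--                 n += 1
--             cur = y
--             runlen = 1
--     if runlen == 2:
--         n += 1
--     return n
-- ===== Notes on version B (the rewrite author's own statement) =====
-- stated objective: alternative
-- what changed: Replaces the Counter-then-scan-values approach by sorting the concatenation of both friends lists and counting runs of equal consecutive elements whose length is exactly 2 in one pass.
import Mathlib
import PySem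

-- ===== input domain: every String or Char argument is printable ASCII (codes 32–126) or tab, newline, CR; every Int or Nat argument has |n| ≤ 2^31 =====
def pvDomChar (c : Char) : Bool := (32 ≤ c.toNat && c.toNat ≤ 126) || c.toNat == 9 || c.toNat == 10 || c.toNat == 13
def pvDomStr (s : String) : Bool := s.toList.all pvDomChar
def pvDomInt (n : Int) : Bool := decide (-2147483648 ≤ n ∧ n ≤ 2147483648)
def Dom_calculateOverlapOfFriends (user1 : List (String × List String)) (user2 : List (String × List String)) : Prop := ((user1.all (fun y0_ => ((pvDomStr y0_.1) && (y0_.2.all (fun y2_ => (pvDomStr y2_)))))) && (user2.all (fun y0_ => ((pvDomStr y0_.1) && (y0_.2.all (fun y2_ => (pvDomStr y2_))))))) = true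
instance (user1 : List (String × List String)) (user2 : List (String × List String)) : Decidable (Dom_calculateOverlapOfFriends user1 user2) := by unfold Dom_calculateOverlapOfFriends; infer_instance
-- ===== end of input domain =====

-- B sorts the concatenation of both friends lists and counts equal-runs of length exactly 2 in one pass,
-- instead of A's Counter over both lists followed by a scan of its values (objective: alternative).


-- ===== PORT A =====
-- usrs['friends'] : dict lookup; the `none` case (Python KeyError) is excluded by Pre_.
def pvFriends (u : List (String × List String)) : List String :=
  ((PySem.Dict.mk u).get? "friends").getD []

-- count_friends: a Counter updated with each user's friends list
def countFriends (users : List (List (String × List String))) : PySem.Dict String Int :=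
  users.foldl (fun c u => (pvFriends u).foldl (fun d x => d.modify x 0 (· + 1)) c) PySem.Dict.empty

def calculateOverlapOfFriends (user1 : List (String × List String)) (user2 : List (String × List String)) : Int :=
  let users := [user1, user2]
  let c := countFriends users
  c.values.foldl (fun N v => if v == 2 then N + 1 else N) 0

-- ===== PORT B =====
-- B's own dict lookup (first matching key, Python KeyError case excluded by Pre_)
def pvFriendsB (u : List (String × List String)) : List String :=
  ((u.find? (fun kv => kv.1 == "friends")).map Prod.snd).getD []

-- run scanner: cur = current run's element, runlen = its length so far, n = runs of length 2 seen
def cofAux (cur : String) (runlen : Int) (n : Int) : List String → Int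
  | [] => if runlen == 2 then n + 1 else n
  | y :: ys =>
    if y == cur then cofAux cur (runlen + 1) n ys
    else cofAux y 1 (if runlen == 2 then n + 1 else n) ys

def calculateOverlapOfFriends_alt (user1 : List (String × List String)) (user2 : List (String × List String)) : Int :=
  let merged := PySem.List.sorted (pvFriendsB user1 ++ pvFriendsB user2) (fun x => x) false
  match merged with
  | [] => 0
  | x :: xs => cofAux x 1 0 xs

-- ===== PRECONDITION & SPEC =====
-- Pre_ excludes exactly the inputs where user['friends'] raises KeyError in A (a missing 'friends' key).
def Pre_calculateOverlapOfFriends (user1 : List (String × List String)) (user2 : List (String × List String)) : Prop :=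
  "friends" ∈ user1.map Prod.fst ∧ "friends" ∈ user2.map Prod.fst
instance (user1 : List (String × List String)) (user2 : List (String × List String)) : Decidable (Pre_calculateOverlapOfFriends user1 user2) := by unfold Pre_calculateOverlapOfFriends; infer_instance

def pvWitness_calculateOverlapOfFriends : (List (String × List String)) × (List (String × List String)) :=
  ([("friends", ["ann", "bob"])], [("friends", ["bob", "cat"])])

def Spec_calculateOverlapOfFriends (user1 : List (String × List String)) (user2 : List (String × List String)) (out : Int) : Prop := out = calculateOverlapOfFriends_alt user1 user2
instance (user1 : List (String × List String)) (user2 : List (String × List String)) (out : Int) : Decidable (Spec_calculateOverlapOfFriends user1 user2 out) := by unfold Spec_calculateOverlapOfFriends; infer_instance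

-- ===== CLAIM (what is proved, stated in full; the proofs are below) =====
def Claim_equal_calculateOverlapOfFriends : Prop := ∀ (user1 : List (String × List String)) (user2 : List (String × List String)), Dom_calculateOverlapOfFriends user1 user2 → Pre_calculateOverlapOfFriends user1 user2 → Spec_calculateOverlapOfFriends user1 user2 (calculateOverlapOfFriends user1 user2)

-- ===== LEMMAS AND PROOFS =====

-- the common value: number of distinct elements of L occurring exactly twice
def pvOverlapSpec (L : List String) : Int :=
  ((L.toFinset.filter (fun x => L.count x = 2)).card : Int)

-- countP of a duplicate-free list as a Finset card
lemma countP_nodup_eq_card_filter (l : List String) (p : String → Bool) (h : l.Nodup) :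
    l.countP p = (l.toFinset.filter (fun x => p x = true)).card := by
  rw [List.countP_eq_length_filter, ← List.toFinset_filter,
      List.toFinset_card_of_nodup (h.filter p)]

-- ===== A-side =====
lemma A_eq_spec (u1 u2 : List (String × List String)) :
    calculateOverlapOfFriends u1 u2 = pvOverlapSpec (pvFriends u1 ++ pvFriends u2) := by
  have hc : countFriends [u1, u2] = PySem.Dict.counter (pvFriends u1 ++ pvFriends u2) := by
    simp [countFriends, PySem.Dict.counter_eq_foldl, List.foldl_append]
  rw [calculateOverlapOfFriends]
  simp only [hc, PySem.List.foldl_beq_add_one]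
  have hv : (PySem.Dict.counter (pvFriends u1 ++ pvFriends u2)).values
      = (PySem.Set.ofList (pvFriends u1 ++ pvFriends u2)).map
          (fun k => ((pvFriends u1 ++ pvFriends u2).count k : Int)) := by
    show ((PySem.Dict.counter _).items.map (·.2)) = _
    rw [PySem.Dict.items_counter]
    simp
  set L := pvFriends u1 ++ pvFriends u2
  rw [hv, List.count_eq_countP, List.countP_map,
      countP_nodup_eq_card_filter _ _ (PySem.Set.nodup_ofList L)]
  have hts : (PySem.Set.ofList L).toFinset = L.toFinset := by
    apply Finset.ext; intro a
    simp [List.mem_toFinset, PySem.Set.mem_ofList]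
  rw [pvOverlapSpec, hts]
  have hfil : L.toFinset.filter (fun x => ((fun x => x == (2:Int)) ∘ fun k => ((L.count k : Nat) : Int)) x = true)
      = L.toFinset.filter (fun x => L.count x = 2) := by
    apply Finset.filter_congr
    intro x _
    simp only [Function.comp_apply, beq_iff_eq]
    exact ⟨fun h => by exact_mod_cast h, fun h => by exact_mod_cast h⟩
  rw [hfil]
  ring

-- ===== B-side =====
-- invariant for the run scanner: on a sorted tail whose elements are all ≥ cur
lemma cofAux_spec (ys : List String) : ∀ (cur : String) (k n : Int),
    ys.Pairwise (· ≤ ·) → (∀ y ∈ ys, cur ≤ y) →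
    cofAux cur k n ys =
      n + (if k + (ys.count cur : Int) = 2 then 1 else 0)
        + (((ys.toFinset.erase cur).filter (fun x => ys.count x = 2)).card : Int) := by
  induction ys with
  | nil =>
    intro cur k n _ _
    simp [cofAux]
    split_ifs <;> omega
  | cons y ys ih =>
    intro cur k n hp hmin
    have hp' : ys.Pairwise (· ≤ ·) := hp.tail
    have hy : ∀ z ∈ ys, y ≤ z := fun z hz => List.rel_of_pairwise_cons hp hz
    by_cases hcur : y = cur
    · subst hcur
      rw [cofAux]
      simp only [beq_self_eq_true, if_true]
      rw [ih y (k + 1) n hp' hy]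
      have h1 : ((y :: ys).count y : Int) = (ys.count y : Int) + 1 := by
        rw [List.count_cons_self]; push_cast; ring
      have h2 : ((y :: ys).toFinset.erase y).filter (fun x => (y :: ys).count x = 2)
          = (ys.toFinset.erase y).filter (fun x => ys.count x = 2) := by
        rw [List.toFinset_cons, Finset.erase_insert_eq_erase]
        apply Finset.filter_congr
        intro x hx
        have hne : x ≠ y := Finset.ne_of_mem_erase hx
        rw [List.count_cons_of_ne (Ne.symm hne)]
      rw [h1, h2]
      have hiff : (k + ((ys.count y : Int) + 1) = 2) ↔ ((k + 1) + (ys.count y : Int) = 2) := by omega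
      simp only [hiff]
    · have hcy : cur ≤ y := hmin y List.mem_cons_self
      have hlt : cur < y := lt_of_le_of_ne hcy (Ne.symm hcur)
      have hnotmem : cur ∉ (y :: ys) := by
        intro hmem
        rcases List.mem_cons.mp hmem with h | h
        · exact hcur h.symm
        · exact absurd (hy cur h) (fun hle => lt_irrefl cur (lt_of_lt_of_le hlt hle))
      rw [cofAux]
      have hbeq : (y == cur) = false := by simp [hcur]
      rw [hbeq]
      simp only [Bool.false_eq_true, if_false]
      rw [ih y 1 (if k == 2 then n + 1 else n) hp' hy]
      have hcnt0 : (y :: ys).count cur = 0 := List.count_eq_zero.mpr hnotmem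
      have hM : (((y :: ys).toFinset.erase cur).filter (fun x => (y :: ys).count x = 2)).card
          = (if 1 + (ys.count y : Int) = 2 then 1 else 0)
            + (((ys.toFinset.erase y).filter (fun x => ys.count x = 2)).card : Int) := by
        have he : (y :: ys).toFinset.erase cur = (y :: ys).toFinset :=
          Finset.erase_eq_self.mpr (by simpa using hnotmem)
        have hins : (y :: ys).toFinset = insert y (ys.toFinset.erase y) := by
          rw [List.toFinset_cons]
          apply Finset.ext; intro a
          simp only [Finset.mem_insert, Finset.mem_erase]
          constructor
          · rintro (rfl | h); · exact Or.inl rfl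
            by_cases hay : a = y; · exact Or.inl hay
            · exact Or.inr ⟨hay, h⟩
          · rintro (rfl | ⟨_, h⟩); · exact Or.inl rfl
            · exact Or.inr h
        rw [he, hins, Finset.filter_insert]
        have hpy : ((y :: ys).count y = 2) ↔ (1 + (ys.count y : Int) = 2) := by
          rw [List.count_cons_self]; omega
        have hrest : (ys.toFinset.erase y).filter (fun x => (y :: ys).count x = 2)
            = (ys.toFinset.erase y).filter (fun x => ys.count x = 2) := by
          apply Finset.filter_congr
          intro x hx
          rw [List.count_cons_of_ne (Ne.symm (Finset.ne_of_mem_erase hx))]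
        by_cases h2 : (y :: ys).count y = 2
        · rw [if_pos h2, Finset.card_insert_of_notMem
            (fun hmem => Finset.notMem_erase y ys.toFinset (Finset.mem_of_mem_filter y hmem))]
          rw [hrest, if_pos (hpy.mp h2)]
          push_cast
          ring
        · rw [if_neg h2, hrest, if_neg (fun h => h2 (hpy.mpr h))]
          ring
      rw [hM, hcnt0]
      have hk : ((k == (2:Int)) = true) ↔ (k + ((0:Nat) : Int) = 2) := by
        simp [beq_iff_eq]
      simp only [hk]
      split_ifs <;> omega

lemma find?_eq_get? (u : List (String × List String)) :
    (u.find? (fun kv => kv.1 == "friends")).map Prod.snd = (PySem.Dict.mk u).get? "friends" := by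
  induction u with
  | nil => rfl
  | cons kv rest ih =>
    rcases kv with ⟨k, v⟩
    rw [PySem.Dict.get?_mk_cons]
    by_cases h : k = "friends"
    · simp [h]
    · have hb : (k == "friends") = false := by simp [h]
      simp only [List.find?_cons, hb, if_false, Bool.false_eq_true]
      exact ih

lemma friendsB_eq (u : List (String × List String)) : pvFriendsB u = pvFriends u := by
  rw [pvFriendsB, pvFriends, find?_eq_get?]

lemma B_eq_spec (u1 u2 : List (String × List String)) :
    calculateOverlapOfFriends_alt u1 u2 = pvOverlapSpec (pvFriends u1 ++ pvFriends u2) := by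
  rw [calculateOverlapOfFriends_alt, friendsB_eq, friendsB_eq]
  set L := pvFriends u1 ++ pvFriends u2 with hL
  have hperm : (PySem.List.sorted L (fun x => x) false).Perm L := PySem.List.sorted_perm L _ _
  have hsorted : (PySem.List.sorted L (fun x => x) false).Pairwise (· ≤ ·) := by
    have := PySem.List.sorted_pairwise L (fun x => x)
    simpa using this
  have hts : (PySem.List.sorted L (fun x => x) false).toFinset = L.toFinset :=
    List.toFinset_eq_of_perm _ _ hperm
  have hcnt : ∀ x, (PySem.List.sorted L (fun x => x) false).count x = L.count x :=
    fun x => hperm.count_eq x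
  rcases hS : PySem.List.sorted L (fun x => x) false with _ | ⟨x, xs⟩
  · have : L = [] := (PySem.List.sorted_eq_nil_iff L _ _).mp hS
    simp [pvOverlapSpec, this]
  · simp only []
    rw [cofAux_spec xs x 1 0 (by rw [hS] at hsorted; exact hsorted.tail)
        (by rw [hS] at hsorted; exact fun y hy => List.rel_of_pairwise_cons hsorted hy)]
    rw [hS] at hts hcnt
    have hcx : ∀ z, L.count z = (x :: xs).count z := fun z => (hcnt z).symm
    have h1 : ((1 : Int) + (xs.count x : Int) = 2) ↔ (L.count x = 2) := by
      rw [hcx x, List.count_cons_self]; omega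
    have h2 : (xs.toFinset.erase x).filter (fun z => xs.count z = 2)
        = (L.toFinset.erase x).filter (fun z => L.count z = 2) := by
      have hexs : xs.toFinset.erase x = L.toFinset.erase x := by
        rw [← hts, List.toFinset_cons, Finset.erase_insert_eq_erase]
      rw [hexs]
      apply Finset.filter_congr
      intro z hz
      rw [hcx z, List.count_cons_of_ne (Ne.symm (Finset.ne_of_mem_erase hz))]
    rw [h2]
    have hxmem : x ∈ L.toFinset := by
      rw [← hts]; simp
    have hsplit : L.toFinset = insert x (L.toFinset.erase x) := (Finset.insert_erase hxmem).symm
    have hrhs : (L.toFinset.filter (fun z => L.count z = 2)).card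
        = (if L.count x = 2 then 1 else 0) + ((L.toFinset.erase x).filter (fun z => L.count z = 2)).card := by
      conv_lhs => rw [hsplit]
      rw [Finset.filter_insert]
      by_cases hq : L.count x = 2
      · rw [if_pos hq, if_pos hq,
          Finset.card_insert_of_notMem
            (fun hmem => (Finset.notMem_erase x L.toFinset) (Finset.mem_of_mem_filter x hmem))]
        omega
      · rw [if_neg hq, if_neg hq]
        omega
    rw [pvOverlapSpec, hrhs]
    simp only [h1]
    push_cast
    ring

-- ===== VERDICT (by name: the statement is the Claim_ definition above) =====
theorem calculateOverlapOfFriends_spec : Claim_equal_calculateOverlapOfFriends := by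
  intro u1 u2 _ _
  show _ = _
  rw [A_eq_spec, B_eq_spec]
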